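-- pv_equiv track=rewrite | github.com/Fredzjl/ChessComplexity | src/data/sampling.py | nearest_unused_index
-- ===== SOURCE A (Python) =====
-- def nearest_unused_index(anchor: int, length: int, used: set[int]) -> int:
--     """Find the nearest index that has not been selected yet."""
--     if anchor not in used:
--         return anchor
--     for delta in range(1, length):
--         left = anchor - delta
--         if left >= 0 and left not in used:
--             return left
--         right = anchor + delta
--         if right < length and right not in used:
--             return right
--     raise ValueError("No unused index remained during spread selection.")
-- ===== SOURCE B (Python) =====
-- def nearest_unused_index(anchor: int, length: int, used: set[int]) -> int:
--     """Find the nearest index that has not been selected yet.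
--
--     Instead of walking outward delta by delta, skip the contiguous block of
--     used indices on each side of the anchor (one pass over the sorted used
--     set per side), then pick the closer valid survivor, left on ties.
--     """
--     if anchor not in used:
--         return anchor
--     l = anchor - 1
--     for u in sorted(used, reverse=True):
--         if u == l:
--             l -= 1
--     r = anchor + 1
--     for u in sorted(used):
--         if u == r:
--             r += 1
--     if l >= 0 and (r >= length or anchor - l <= r - anchor):
--         return l
--     if r < length:
--         return r
--     raise ValueError("No unused index remained during spread selection.")
-- ===== Notes on version B (the rewrite author's own statement) =====
-- stated objective: alternative
-- what changed: Replaces the outward delta-by-delta walk with skipping the contiguous block of used indices on each side of the anchor (one pass over the sorted used set per side) followed by a constant-time distance comparison (left wins ties).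
import Mathlib
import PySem

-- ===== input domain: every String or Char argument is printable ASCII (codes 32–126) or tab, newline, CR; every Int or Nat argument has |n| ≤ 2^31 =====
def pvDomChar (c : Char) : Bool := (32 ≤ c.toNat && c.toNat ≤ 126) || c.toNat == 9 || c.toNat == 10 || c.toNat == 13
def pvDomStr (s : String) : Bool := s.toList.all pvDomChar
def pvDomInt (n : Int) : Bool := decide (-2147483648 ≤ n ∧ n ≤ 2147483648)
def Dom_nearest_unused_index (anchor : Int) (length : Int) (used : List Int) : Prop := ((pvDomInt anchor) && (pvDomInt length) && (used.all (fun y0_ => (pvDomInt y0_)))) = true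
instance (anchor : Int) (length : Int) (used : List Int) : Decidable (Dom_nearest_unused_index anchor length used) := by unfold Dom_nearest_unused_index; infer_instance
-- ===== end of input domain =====

-- B replaces A's outward delta walk by skipping the contiguous block of used indices on each
-- side of the anchor (one pass over the sorted used set per side) and a constant-time choice;
-- equal to A wherever A returns (Pre_ excludes exactly the ValueError raises of A).


-- ===== PORT A =====
-- 'range(1, length)' is lazy in Python, so the loop is ported numerically: delta counts up from 1,
-- the fuel (length - 1).toNat = len(range(1, length)) makes it total
def nuiLoopA (anchor length : Int) (used : List Int) : Int → Nat → Option Int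
  | _, 0 => none
  | d, Nat.succ fuel =>
    let left := anchor - d
    if 0 ≤ left ∧ ¬ used.contains left = true then some left
    else
      let right := anchor + d
      if right < length ∧ ¬ used.contains right = true then some right
      else nuiLoopA anchor length used (d + 1) fuel

def nearest_unused_index (anchor : Int) (length : Int) (used : List Int) : Int :=
  if !(used.contains anchor) then anchor
  else (nuiLoopA anchor length used 1 (length - 1).toNat).getD 0
  -- '.getD 0' only covers the raise of ValueError, which Pre_ excludes

-- ===== PORT B =====
-- 'l = anchor-1; for u in sorted(used, reverse=True): if u == l: l -= 1'
def nuiSkipDown (used : List Int) (l0 : Int) : Int :=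
  (PySem.List.sorted used (fun x => x) true).foldl (fun l u => if u = l then l - 1 else l) l0

-- 'r = anchor+1; for u in sorted(used): if u == r: r += 1'
def nuiSkipUp (used : List Int) (r0 : Int) : Int :=
  (PySem.List.sorted used (fun x => x) false).foldl (fun r u => if u = r then r + 1 else r) r0

def nearest_unused_index_alt (anchor : Int) (length : Int) (used : List Int) : Int :=
  if !(used.contains anchor) then anchor
  else
    let l := nuiSkipDown used (anchor - 1)
    let r := nuiSkipUp used (anchor + 1)
    if 0 ≤ l ∧ (length ≤ r ∨ anchor - l ≤ r - anchor) then l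
    else if r < length then r
    else 0
    -- '0' only covers the raise of ValueError, which Pre_ excludes

-- ===== PRECONDITION & SPEC =====
-- 'some index of [a, b] is not in used': fewer distinct used values in [a, b] than the interval has elements
abbrev pvFreeIn (used : List Int) (a b : Int) : Prop :=
  (((used.filter (fun i => decide (a ≤ i) && decide (i ≤ b))).dedup.length : Int) < b - a + 1)

-- Pre_ excludes exactly the inputs on which A raises ValueError: the anchor is used and every
-- index A's walk visits (lefts in [max(0, anchor-length+1), anchor-1], rights in
-- [anchor+1, min(length-1, anchor+length-1)]) is used too.
def Pre_nearest_unused_index (anchor : Int) (length : Int) (used : List Int) : Prop :=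
  ¬ used.contains anchor = true ∨
    pvFreeIn used (max 0 (anchor - length + 1)) (anchor - 1) ∨
    pvFreeIn used (anchor + 1) (min (length - 1) (anchor + length - 1))
instance (anchor : Int) (length : Int) (used : List Int) : Decidable (Pre_nearest_unused_index anchor length used) := by unfold Pre_nearest_unused_index; infer_instance
def pvWitness_nearest_unused_index : Int × Int × List Int := (1, 3, [1])

def Spec_nearest_unused_index (anchor : Int) (length : Int) (used : List Int) (out : Int) : Prop := out = nearest_unused_index_alt anchor length used
instance (anchor : Int) (length : Int) (used : List Int) (out : Int) : Decidable (Spec_nearest_unused_index anchor length used out) := by unfold Spec_nearest_unused_index; infer_instance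

-- ===== CLAIM (what is proved, stated in full; the proofs are below) =====
def Claim_equal_nearest_unused_index : Prop := ∀ (anchor : Int) (length : Int) (used : List Int), Dom_nearest_unused_index anchor length used → Pre_nearest_unused_index anchor length used → Spec_nearest_unused_index anchor length used (nearest_unused_index anchor length used)

-- ===== LEMMAS AND PROOFS =====

-- the candidates A's loop inspects at one delta, in A's order
def nuiCandD (anchor length d : Int) : List Int :=
  (if 0 ≤ anchor - d then [anchor - d] else []) ++ (if anchor + d < length then [anchor + d] else [])

-- A's loop is the first-unused scan of the flattened candidate list
theorem nuiLoopA_eq_find? (anchor length : Int) (used : List Int) : ∀ (n : Nat) (d : Int),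
    (length - d).toNat = n →
    nuiLoopA anchor length used d n
      = (((PySem.List.pyRange d length 1).flatMap (nuiCandD anchor length)).find?
          (fun i => !(used.contains i))) := by
  intro n
  induction n with
  | zero =>
    intro d hn
    rw [PySem.List.pyRange_one_eq_nil (by omega)]
    rfl
  | succ n ih =>
    intro d hn
    rw [PySem.List.pyRange_one_cons (by omega)]
    by_cases hl : d ≤ anchor <;> by_cases hcl : (anchor - d) ∈ used <;>
      by_cases hr : anchor + d < length <;> by_cases hcr : (anchor + d) ∈ used <;>
        simp [nuiLoopA, nuiCandD, List.flatMap_cons, List.find?_append, Int.sub_nonneg,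
          hl, hcl, hr, hcr, ih (d + 1) (by omega)]

-- a pvFreeIn interval really contains an element outside used (pigeonhole on distinct values)
theorem pvFreeIn_exists (used : List Int) (a b : Int) (h : pvFreeIn used a b) :
    ∃ i, a ≤ i ∧ i ≤ b ∧ i ∉ used := by
  by_contra hno
  push Not at hno
  have hsub : PySem.List.pyRange a (b + 1) 1
      ⊆ (used.filter (fun i => decide (a ≤ i) && decide (i ≤ b))).dedup := by
    intro x hx
    rw [PySem.List.mem_pyRange_one] at hx
    rw [List.mem_dedup, List.mem_filter]
    refine ⟨hno x hx.1 (by omega), ?_⟩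
    simp only [Bool.and_eq_true, decide_eq_true_eq]
    omega
  have hlen := (List.subperm_of_subset (PySem.List.nodup_pyRange_one a (b + 1)) hsub).length_le
  rw [PySem.List.length_pyRange_one] at hlen
  unfold pvFreeIn at h
  omega

-- the downward cluster-skip loop: result is below l0, free, and everything strictly between is used
theorem descFold_spec : ∀ (s : List Int), s.Pairwise (fun a b => b ≤ a) → ∀ (l0 : Int),
    (s.foldl (fun l u => if u = l then l - 1 else l) l0) ≤ l0 ∧
    (s.foldl (fun l u => if u = l then l - 1 else l) l0) ∉ s ∧
    (∀ i, (s.foldl (fun l u => if u = l then l - 1 else l) l0) < i → i ≤ l0 → i ∈ s) := by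
  intro s
  induction s with
  | nil =>
    intro _ l0
    exact ⟨le_rfl, by simp, fun i h1 h2 => absurd (h1.trans_le h2) (lt_irrefl _)⟩
  | cons u t ih =>
    intro hp l0
    obtain ⟨hall, ht⟩ := List.pairwise_cons.mp hp
    rw [List.foldl_cons]
    by_cases hu : u = l0
    · rw [if_pos hu]
      obtain ⟨h1, h2, h3⟩ := ih ht (l0 - 1)
      refine ⟨by omega, ?_, ?_⟩
      · simp only [List.mem_cons, not_or]
        exact ⟨by omega, h2⟩
      · intro i hi1 hi2
        rcases eq_or_lt_of_le hi2 with rfl | hlt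
        · exact List.mem_cons.mpr (Or.inl hu.symm)
        · exact List.mem_cons.mpr (Or.inr (h3 i hi1 (by omega)))
    · rw [if_neg hu]
      obtain ⟨h1, h2, h3⟩ := ih ht l0
      have hne : t.foldl (fun l u => if u = l then l - 1 else l) l0 ≠ u := by
        intro he
        by_cases hlt : u < l0
        · have hmem : l0 ∈ t := h3 l0 (by omega) le_rfl
          have := hall l0 hmem
          omega
        · omega
      refine ⟨h1, ?_, fun i hi1 hi2 => List.mem_cons.mpr (Or.inr (h3 i hi1 hi2))⟩
      simp only [List.mem_cons, not_or]
      exact ⟨hne, h2⟩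

-- the upward cluster-skip loop, mirror image
theorem ascFold_spec : ∀ (s : List Int), s.Pairwise (fun a b => a ≤ b) → ∀ (r0 : Int),
    r0 ≤ (s.foldl (fun r u => if u = r then r + 1 else r) r0) ∧
    (s.foldl (fun r u => if u = r then r + 1 else r) r0) ∉ s ∧
    (∀ i, r0 ≤ i → i < (s.foldl (fun r u => if u = r then r + 1 else r) r0) → i ∈ s) := by
  intro s
  induction s with
  | nil =>
    intro _ r0
    exact ⟨le_rfl, by simp, fun i h1 h2 => absurd (h1.trans_lt h2) (lt_irrefl _)⟩
  | cons u t ih =>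
    intro hp r0
    obtain ⟨hall, ht⟩ := List.pairwise_cons.mp hp
    rw [List.foldl_cons]
    by_cases hu : u = r0
    · rw [if_pos hu]
      obtain ⟨h1, h2, h3⟩ := ih ht (r0 + 1)
      refine ⟨by omega, ?_, ?_⟩
      · simp only [List.mem_cons, not_or]
        exact ⟨by omega, h2⟩
      · intro i hi1 hi2
        rcases eq_or_lt_of_le hi1 with rfl | hlt
        · exact List.mem_cons.mpr (Or.inl hu.symm)
        · exact List.mem_cons.mpr (Or.inr (h3 i (by omega) hi2))
    · rw [if_neg hu]
      obtain ⟨h1, h2, h3⟩ := ih ht r0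
      have hne : t.foldl (fun r u => if u = r then r + 1 else r) r0 ≠ u := by
        intro he
        by_cases hlt : r0 < u
        · have hmem : r0 ∈ t := h3 r0 le_rfl (by omega)
          have := hall r0 hmem
          omega
        · omega
      refine ⟨h1, ?_, fun i hi1 hi2 => List.mem_cons.mpr (Or.inr (h3 i hi1 hi2))⟩
      simp only [List.mem_cons, not_or]
      exact ⟨hne, h2⟩

theorem nuiSkipDown_spec (used : List Int) (l0 : Int) :
    nuiSkipDown used l0 ≤ l0 ∧ nuiSkipDown used l0 ∉ used ∧
    (∀ i, nuiSkipDown used l0 < i → i ≤ l0 → i ∈ used) := by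
  have hp : (PySem.List.sorted used (fun x => x) true).Pairwise (fun a b => b ≤ a) :=
    PySem.List.sorted_pairwise_rev used (fun x => x)
  obtain ⟨h1, h2, h3⟩ := descFold_spec (PySem.List.sorted used (fun x => x) true) hp l0
  rw [PySem.List.mem_sorted] at h2
  refine ⟨h1, h2, fun i hi1 hi2 => ?_⟩
  have := h3 i hi1 hi2
  rwa [PySem.List.mem_sorted] at this

theorem nuiSkipUp_spec (used : List Int) (r0 : Int) :
    r0 ≤ nuiSkipUp used r0 ∧ nuiSkipUp used r0 ∉ used ∧
    (∀ i, r0 ≤ i → i < nuiSkipUp used r0 → i ∈ used) := by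
  have hp : (PySem.List.sorted used (fun x => x) false).Pairwise (fun a b => a ≤ b) :=
    PySem.List.sorted_pairwise used (fun x => x)
  obtain ⟨h1, h2, h3⟩ := ascFold_spec (PySem.List.sorted used (fun x => x) false) hp r0
  rw [PySem.List.mem_sorted] at h2
  refine ⟨h1, h2, fun i hi1 hi2 => ?_⟩
  have := h3 i hi1 hi2
  rwa [PySem.List.mem_sorted] at this

-- ===== VERDICT (by name: the statement is the Claim_ definition above) =====
theorem nearest_unused_index_spec : Claim_equal_nearest_unused_index := by
  intro anchor length used _ hpre
  unfold Spec_nearest_unused_index nearest_unused_index nearest_unused_index_alt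
  by_cases hc : anchor ∈ used
  case neg => simp [hc]
  case pos =>
  have hcb : (!(used.contains anchor)) = false := by simp [hc]
  rw [hcb]
  simp only [Bool.false_eq_true, if_false]
  obtain ⟨hl1, hl2, hl3⟩ := nuiSkipDown_spec used (anchor - 1)
  obtain ⟨hr1, hr2, hr3⟩ := nuiSkipUp_spec used (anchor + 1)
  set lF := nuiSkipDown used (anchor - 1) with hlF
  set rF := nuiSkipUp used (anchor + 1) with hrF
  -- Pre_ (anchor used) gives a free A-candidate; push it through max/min-imality of lF / rF
  have hfacts : (0 ≤ lF ∧ anchor - lF ≤ length - 1) ∨ (rF ≤ length - 1 ∧ rF - anchor ≤ length - 1) := by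
    rcases hpre with hpre | hpre | hpre
    · exact absurd (by simp [hc]) hpre
    · obtain ⟨j, hj1, hj2, hj3⟩ := pvFreeIn_exists _ _ _ hpre
      have hjl : j ≤ lF := by
        by_contra hgt
        exact hj3 (hl3 j (by omega) (by omega))
      left; omega
    · obtain ⟨j, hj1, hj2, hj3⟩ := pvFreeIn_exists _ _ _ hpre
      have hjr : rF ≤ j := by
        by_contra hgt
        exact hj3 (hr3 j (by omega) (by omega))
      right; omega
  rw [nuiLoopA_eq_find? anchor length used (length - 1).toNat 1 rfl]
  -- common machinery: the scan returns the candidate at delta m when all earlier candidates are used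
  have hnone : ∀ (m : Int), (∀ d, 1 ≤ d → d < m →
        (0 ≤ anchor - d → anchor - d ∈ used) ∧ (anchor + d < length → anchor + d ∈ used)) →
      List.find? (fun i => !(used.contains i))
        ((PySem.List.pyRange 1 m 1).flatMap (nuiCandD anchor length)) = none := by
    intro m hall
    rw [List.find?_eq_none]
    intro x hx
    rw [List.mem_flatMap] at hx
    obtain ⟨d, hd, hxm⟩ := hx
    rw [PySem.List.mem_pyRange_one] at hd
    unfold nuiCandD at hxm
    rw [List.mem_append] at hxm
    rcases hxm with hxm | hxm <;> split_ifs at hxm with hcond <;> simp at hxm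
    · subst hxm
      simp [(hall d hd.1 hd.2).1 hcond]
    · subst hxm
      simp [(hall d hd.1 hd.2).2 hcond]
  by_cases hb1 : 0 ≤ lF ∧ (length ≤ rF ∨ anchor - lF ≤ rF - anchor)
  · -- B returns lF; show A's scan hits lF at delta m = anchor - lF
    rw [if_pos hb1]
    have hm1 : 1 ≤ anchor - lF := by omega
    have hmlen : anchor - lF < length := by
      rcases hfacts with h | h
      · omega
      · rcases hb1.2 with h2 | h2 <;> omega
    have hprefix : ∀ d, 1 ≤ d → d < anchor - lF →
        (0 ≤ anchor - d → anchor - d ∈ used) ∧ (anchor + d < length → anchor + d ∈ used) := by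
      intro d hd1 hd2
      constructor
      · intro _; exact hl3 (anchor - d) (by omega) (by omega)
      · intro hlt
        refine hr3 (anchor + d) (by omega) ?_
        rcases hb1.2 with h2 | h2 <;> omega
    rw [PySem.List.pyRange_one_append 1 (anchor - lF) length (by omega) (by omega),
        List.flatMap_append, List.find?_append, hnone (anchor - lF) hprefix, Option.none_or,
        PySem.List.pyRange_one_cons (by omega : anchor - lF < length), List.flatMap_cons,
        List.find?_append]
    unfold nuiCandD
    rw [if_pos (by omega : (0:Int) ≤ anchor - (anchor - lF))]
    have : anchor - (anchor - lF) = lF := by omega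
    rw [this]
    simp [hl2]
  · rw [if_neg hb1]
    have hb2 : rF < length := by
      rcases hfacts with h | h
      · by_contra hge
        exact hb1 ⟨h.1, Or.inl (by omega)⟩
      · omega
    rw [if_pos hb2]
    -- B returns rF; show A's scan hits rF at delta m = rF - anchor
    have hm1 : 1 ≤ rF - anchor := by omega
    have hdrdl : ¬ (0 ≤ lF) ∨ rF - anchor < anchor - lF := by
      by_cases h0 : 0 ≤ lF
      · right
        rcases (not_and_or.mp hb1) with h | h
        · exact absurd h0 h
        · push Not at h
          omega
      · exact Or.inl h0
    have hmlen : rF - anchor < length := by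
      rcases hfacts with h | h
      · rcases hdrdl with h2 | h2 <;> omega
      · omega
    have hprefix : ∀ d, 1 ≤ d → d < rF - anchor →
        (0 ≤ anchor - d → anchor - d ∈ used) ∧ (anchor + d < length → anchor + d ∈ used) := by
      intro d hd1 hd2
      constructor
      · intro h0
        refine hl3 (anchor - d) ?_ (by omega)
        rcases hdrdl with h2 | h2 <;> omega
      · intro _; exact hr3 (anchor + d) (by omega) (by omega)
    rw [PySem.List.pyRange_one_append 1 (rF - anchor) length (by omega) (by omega),
        List.flatMap_append, List.find?_append, hnone (rF - anchor) hprefix, Option.none_or,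
        PySem.List.pyRange_one_cons (by omega : rF - anchor < length), List.flatMap_cons,
        List.find?_append]
    unfold nuiCandD
    have hrw : anchor + (rF - anchor) = rF := by omega
    by_cases h0 : (0:Int) ≤ anchor - (rF - anchor)
    · rw [if_pos h0]
      have hused : anchor - (rF - anchor) ∈ used := by
        refine hl3 (anchor - (rF - anchor)) ?_ (by omega)
        rcases hdrdl with h2 | h2 <;> omega
      rw [if_pos (by omega : anchor + (rF - anchor) < length), hrw]
      simp [hused, hr2]
    · rw [if_neg h0, if_pos (by omega : anchor + (rF - anchor) < length), hrw]
      simp [hr2]
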